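-- pv_equiv track=rewrite | github.com/memologoped/columnsAgent | utils.py | generate_freq_table
-- ===== SOURCE A (Python) =====
-- def generate_freq_table(data: str, k: int) -> dict:
--     table = {}
--     for i in range(len(data) - k):
--         x = data[i:i + k]
--         y = data[i + k]
--
--         if table.get(x) is None:
--             table[x] = {}
--             table[x][y] = 1
--         else:
--             if table[x].get(y) is None:
--                 table[x][y] = 1
--             else:
--                 table[x][y] += 1
--     return table
-- ===== SOURCE B (Python) =====
-- def generate_freq_table(data: str, k: int) -> dict:
--     follow = {}
--     for i in range(len(data) - k):
--         follow.setdefault(data[i:i + k], []).append(data[i + k])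
--     return {x: {y: ys.count(y) for y in dict.fromkeys(ys)} for x, ys in follow.items()}
-- ===== Notes on version B (the rewrite author's own statement) =====
-- stated objective: alternative
-- what changed: Instead of incrementing nested counters inline with three-way None checks, B first groups the data into lists of following characters per k-gram, then in a separate pass turns each list into a frequency dict by counting over its ordered-deduplicated characters.
import Mathlib
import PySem

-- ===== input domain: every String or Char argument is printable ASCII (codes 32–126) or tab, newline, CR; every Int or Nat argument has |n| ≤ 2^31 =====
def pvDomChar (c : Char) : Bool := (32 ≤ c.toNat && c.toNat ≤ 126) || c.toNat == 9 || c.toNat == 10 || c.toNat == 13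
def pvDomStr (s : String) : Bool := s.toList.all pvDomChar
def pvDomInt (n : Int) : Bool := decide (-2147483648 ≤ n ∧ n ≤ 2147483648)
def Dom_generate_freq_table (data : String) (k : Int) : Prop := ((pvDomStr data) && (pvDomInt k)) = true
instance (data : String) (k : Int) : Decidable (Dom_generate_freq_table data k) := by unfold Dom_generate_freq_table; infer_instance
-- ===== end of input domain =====

-- B groups the following characters per k-gram first and counts them in a separate pass
-- (ordered dedup + count), instead of A's inline nested-counter increments; same cost class.

-- ===== PORT A =====
def generate_freq_table (data : String) (k : Int) : List (String × List (String × Int)) :=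
  let cs := data.toList
  let table := (PySem.List.pyRange 0 ((cs.length : Int) - k) 1).foldl
    (fun (table : PySem.Dict String (PySem.Dict String Int)) i =>
      let x : String := String.ofList (PySem.List.slice cs (some i) (some (i + k)))
      let y : String := String.ofList [PySem.List.pyGetD cs (i + k) 'a']
      match table.get? x with
      | none => table.insert x ((PySem.Dict.empty).insert y 1)
      | some inner =>
        match inner.get? y with
        | none => table.insert x (inner.insert y 1)
        | some c => table.insert x (inner.insert y (c + 1)))
    PySem.Dict.empty
  table.items.map (fun p => (p.1, p.2.items))

-- ===== PORT B =====
def generate_freq_table_alt (data : String) (k : Int) : List (String × List (String × Int)) :=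
  let cs := data.toList
  let follow := (PySem.List.pyRange 0 ((cs.length : Int) - k) 1).foldl
    (fun (d : PySem.Dict String (List String)) i =>
      d.modify (String.ofList (PySem.List.slice cs (some i) (some (i + k)))) []
        (· ++ [String.ofList [PySem.List.pyGetD cs (i + k) 'a']]))
    PySem.Dict.empty
  follow.items.map
    (fun p => (p.1, (PySem.List.dedup p.2).map (fun y => (y, (PySem.List.count p.2 y : Int)))))

-- ===== PRECONDITION & SPEC =====
-- Pre_ excludes exactly k < -len(data), where Python A raises IndexError on data[i+k] (and B raises too).
def Pre_generate_freq_table (data : String) (k : Int) : Prop := -(data.toList.length : Int) ≤ k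
instance (data : String) (k : Int) : Decidable (Pre_generate_freq_table data k) := by
  unfold Pre_generate_freq_table; infer_instance
def pvWitness_generate_freq_table : String × Int := ("abcab", 1)

def Spec_generate_freq_table (data : String) (k : Int) (out : List (String × List (String × Int))) : Prop := out = generate_freq_table_alt data k
instance (data : String) (k : Int) (out : List (String × List (String × Int))) : Decidable (Spec_generate_freq_table data k out) := by unfold Spec_generate_freq_table; infer_instance

-- ===== CLAIM (what is proved, stated in full; the proofs are below) =====
def Claim_equal_generate_freq_table : Prop := ∀ (data : String) (k : Int), Dom_generate_freq_table data k → Pre_generate_freq_table data k → Spec_generate_freq_table data k (generate_freq_table data k)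

-- ===== LEMMAS AND PROOFS =====

-- A's counting table is B's grouping table with every value list replaced by its Counter.
def pvMapC (d : PySem.Dict String (List String)) : PySem.Dict String (PySem.Dict String Int) :=
  PySem.Dict.mk (d.items.map (fun p => (p.1, PySem.Dict.counter p.2)))

theorem pvMapC_get? (d : PySem.Dict String (List String)) (x : String) :
    (pvMapC d).get? x = (d.get? x).map PySem.Dict.counter := by
  simp [pvMapC, PySem.Dict.get?, List.find?_map, Function.comp_def]

theorem pvMapC_contains (d : PySem.Dict String (List String)) (x : String) :
    (pvMapC d).contains x = d.contains x := by
  simp [pvMapC, PySem.Dict.contains, List.any_map, Function.comp_def]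

theorem pvMapC_insert (d : PySem.Dict String (List String)) (x : String) (ys : List String) :
    pvMapC (d.insert x ys) = (pvMapC d).insert x (PySem.Dict.counter ys) := by
  apply PySem.Dict.ext
  cases hc : d.contains x with
  | true =>
      rw [PySem.Dict.items_insert_of_contains _ _ (by rw [pvMapC_contains]; exact hc)]
      simp only [pvMapC, PySem.Dict.items_insert_of_contains _ _ hc, List.map_map]
      apply List.map_congr_left
      intro p _
      by_cases hpx : p.1 = x <;> simp [hpx]
  | false =>
      rw [PySem.Dict.items_insert_of_not_contains _ _ (by rw [pvMapC_contains]; exact hc)]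
      simp [pvMapC, PySem.Dict.items_insert_of_not_contains _ _ hc]

theorem pvMapC_getD (d : PySem.Dict String (List String)) (x : String) :
    (pvMapC d).getD x PySem.Dict.empty = PySem.Dict.counter (d.getD x []) := by
  cases h : d.get? x <;> simp [PySem.Dict.getD, pvMapC_get?, h, PySem.Dict.counter]

-- one loop step: A's three-way branch on pvMapC d equals pvMapC of B's list-append step
theorem pvStep (d : PySem.Dict String (List String)) (x y : String) :
    (match (pvMapC d).get? x with
     | none => (pvMapC d).insert x ((PySem.Dict.empty).insert y 1)
     | some inner =>
       match inner.get? y with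
       | none => (pvMapC d).insert x (inner.insert y 1)
       | some c => (pvMapC d).insert x (inner.insert y (c + 1)))
    = pvMapC (d.modify x [] (· ++ [y])) := by
  have hmod : d.modify x [] (· ++ [y]) = d.insert x (d.getD x [] ++ [y]) := rfl
  rw [hmod, pvMapC_insert, PySem.Dict.counter_append_singleton]
  have hm : (PySem.Dict.counter (d.getD x [])).modify y 0 (· + 1)
      = (PySem.Dict.counter (d.getD x [])).insert y
          ((PySem.Dict.counter (d.getD x [])).getD y 0 + 1) := rfl
  rw [hm, ← pvMapC_getD]
  cases hx : (pvMapC d).get? x with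
  | none =>
      simp only [PySem.Dict.getD, hx, Option.getD_none]
      norm_num [PySem.Dict.getD]
  | some inner =>
      simp only [PySem.Dict.getD, hx, Option.getD_some]
      cases hy : inner.get? y with
      | none => simp
      | some c => simp

-- loop invariant over any index list
theorem pvLoop (cs : List Char) (k : Int) (l : List Int) (d : PySem.Dict String (List String)) :
    l.foldl
      (fun (table : PySem.Dict String (PySem.Dict String Int)) i =>
        let x : String := String.ofList (PySem.List.slice cs (some i) (some (i + k)))
        let y : String := String.ofList [PySem.List.pyGetD cs (i + k) 'a']
        match table.get? x with
        | none => table.insert x ((PySem.Dict.empty).insert y 1)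
        | some inner =>
          match inner.get? y with
          | none => table.insert x (inner.insert y 1)
          | some c => table.insert x (inner.insert y (c + 1)))
      (pvMapC d)
    = pvMapC (l.foldl
        (fun (d : PySem.Dict String (List String)) i =>
          d.modify (String.ofList (PySem.List.slice cs (some i) (some (i + k)))) []
            (· ++ [String.ofList [PySem.List.pyGetD cs (i + k) 'a']])) d) := by
  induction l generalizing d with
  | nil => rfl
  | cons i t ih =>
      simp only [List.foldl_cons]
      rw [pvStep, ih]

-- ===== VERDICT (by name: the statement is the Claim_ definition above) =====
theorem generate_freq_table_spec : Claim_equal_generate_freq_table := by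
  intro data k _ _
  unfold Spec_generate_freq_table
  have hempty : (PySem.Dict.empty : PySem.Dict String (PySem.Dict String Int))
      = pvMapC PySem.Dict.empty := rfl
  simp only [generate_freq_table, generate_freq_table_alt]
  rw [hempty, pvLoop]
  simp only [pvMapC, List.map_map]
  apply List.map_congr_left
  intro p _
  simp [PySem.Dict.items_counter, PySem.List.dedup]
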